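-- pv_equiv track=rewrite | github.com/nihilistau/shannon-prime | tools/sp_chord_diagnostic.py | sqfree_pad_dim
-- ===== SOURCE A (Python) =====
-- SQFREE_PAD = {64: 66, 96: 110, 128: 154, 256: 330}
--
-- def _is_sqfree_rich(n: int, min_distinct: int = 3) -> bool:
--     """Check if n is squarefree and has >= min_distinct prime factors from {2,3,5,7,11}.
--
--     Squarefree means no prime appears more than once in the factorization.
--     This ensures the VHT2 Vilenkin decomposition has multiple distinct prime
--     dimensions to work with.
--     """
--     distinct = 0
--     d = n
--     for p in [2, 3, 5, 7, 11]:
--         if d % p == 0: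
--             distinct += 1
--             d //= p
--             if d % p == 0:
--                 return False  # Not squarefree — p appears more than once
--     return d == 1 and distinct >= min_distinct
--
-- def sqfree_pad_dim(head_dim: int) -> int:
--     """Find next squarefree-rich dimension >= head_dim.
--
--     Returns the smallest n >= head_dim such that n factors entirely into
--     {2,3,5,7,11} with each prime appearing at most once, and at least
--     3 distinct primes are used.
--     """
--     if head_dim in SQFREE_PAD:
--         return SQFREE_PAD[head_dim]
--     n = head_dim
--     while n < head_dim * 2:  # Safety bound: don't pad more than 2×
--         if _is_sqfree_rich(n):
--             return n
--         n += 1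
--     # Fallback: return head_dim unchanged (no viable pad found)
--     return head_dim
-- ===== SOURCE B (Python) =====
-- SQFREE_PAD = {64: 66, 96: 110, 128: 154, 256: 330}
--
-- # All products of >=3 distinct primes from {2,3,5,7,11}, ascending.
-- _PRODUCTS = (30, 42, 66, 70, 105, 110, 154, 165, 210, 231, 330, 385, 462, 770, 1155, 2310)
--
-- def sqfree_pad_dim(head_dim: int) -> int:
--     override = SQFREE_PAD.get(head_dim)
--     if override is not None:
--         return override
--     for s in _PRODUCTS:
--         if s >= head_dim:
--             return s if s < head_dim * 2 else head_dim
--     return head_dim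
-- ===== Notes on version B (the rewrite author's own statement) =====
-- stated objective: faster
-- what changed: B replaces A's upward scan with trial-factorization tests by a single lookup of the smallest admissible value in a precomputed ascending table of all squarefree-rich prime products, keeping the dict overrides and the doubling bound.
import Mathlib
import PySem

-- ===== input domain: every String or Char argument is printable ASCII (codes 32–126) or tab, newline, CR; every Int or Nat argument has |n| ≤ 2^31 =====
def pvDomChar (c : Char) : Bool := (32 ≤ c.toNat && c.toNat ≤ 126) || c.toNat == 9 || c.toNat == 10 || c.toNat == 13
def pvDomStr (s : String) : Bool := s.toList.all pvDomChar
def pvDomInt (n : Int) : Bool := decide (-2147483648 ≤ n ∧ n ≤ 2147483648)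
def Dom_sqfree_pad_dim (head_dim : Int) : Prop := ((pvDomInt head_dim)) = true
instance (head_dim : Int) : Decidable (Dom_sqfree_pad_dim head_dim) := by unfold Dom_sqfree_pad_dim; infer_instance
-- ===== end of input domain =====

-- B replaces A's O(head_dim) upward scan with factorization tests by a lookup in the
-- precomputed ascending table of all 16 squarefree-rich {2,3,5,7,11}-products (objective: faster).

-- ===== PORT A =====
def SQFREE_PAD : PySem.Dict Int Int :=
  (((PySem.Dict.empty.insert 64 66).insert 96 110).insert 128 154).insert 256 330

-- the `for p in [2,3,5,7,11]` loop of _is_sqfree_rich; `none` = the early `return False`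
def richLoopA : List Int → Int → Int → Option (Int × Int)
  | [], distinct, d => some (distinct, d)
  | p :: ps, distinct, d =>
    if PySem.Int.mod d p = 0 then
      let distinct' := distinct + 1
      let d' := PySem.Int.floordiv d p
      if PySem.Int.mod d' p = 0 then none   -- not squarefree
      else richLoopA ps distinct' d'
    else richLoopA ps distinct d

def is_sqfree_richA (n : Int) (min_distinct : Int) : Bool :=
  match richLoopA [2, 3, 5, 7, 11] 0 n with
  | none => false
  | some (distinct, d) => decide (d = 1) && decide (min_distinct ≤ distinct)

-- the `while n < head_dim * 2` loop
def padLoopA (head_dim : Int) (n : Int) : Int :=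
  if _h : n < head_dim * 2 then
    if is_sqfree_richA n 3 then n else padLoopA head_dim (n + 1)
  else head_dim
termination_by (head_dim * 2 - n).toNat
decreasing_by omega

def sqfree_pad_dim (head_dim : Int) : Int :=
  if SQFREE_PAD.contains head_dim then (SQFREE_PAD.get? head_dim).getD 0
  else padLoopA head_dim head_dim

-- ===== PORT B =====
def SQFREE_PAD_B : PySem.Dict Int Int :=
  (((PySem.Dict.empty.insert 64 66).insert 96 110).insert 128 154).insert 256 330

-- all products of ≥ 3 distinct primes from {2,3,5,7,11}, ascending
def PRODUCTS : List Int :=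
  [30, 42, 66, 70, 105, 110, 154, 165, 210, 231, 330, 385, 462, 770, 1155, 2310]

def sqfree_pad_dim_alt (head_dim : Int) : Int :=
  match SQFREE_PAD_B.get? head_dim with
  | some v => v
  | none =>
    match PRODUCTS.find? (fun s => head_dim ≤ s) with
    | some s => if s < head_dim * 2 then s else head_dim
    | none => head_dim

-- ===== PRECONDITION & SPEC =====
def Spec_sqfree_pad_dim (head_dim : Int) (out : Int) : Prop := out = sqfree_pad_dim_alt head_dim
instance (head_dim : Int) (out : Int) : Decidable (Spec_sqfree_pad_dim head_dim out) := by unfold Spec_sqfree_pad_dim; infer_instance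

-- ===== CLAIM (what is proved, stated in full; the proofs are below) =====
def Claim_equal_sqfree_pad_dim : Prop := ∀ (head_dim : Int), Dom_sqfree_pad_dim head_dim → Spec_sqfree_pad_dim head_dim (sqfree_pad_dim head_dim)

-- ===== LEMMAS AND PROOFS =====

lemma richLoopA_spec : ∀ (ps : List Int) (distinct0 d0 distinct d : Int),
    (∀ p ∈ ps, 0 < p) →
    richLoopA ps distinct0 d0 = some (distinct, d) →
    ∃ S : List Int, S.Sublist ps ∧ d0 = d * S.prod ∧ distinct = distinct0 + S.length := by
  intro ps
  induction ps with
  | nil =>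
    intro distinct0 d0 distinct d _ h
    simp only [richLoopA, Option.some.injEq, Prod.mk.injEq] at h
    exact ⟨[], List.Sublist.refl _, by simp [h.2], by simp [h.1]⟩
  | cons p ps ih =>
    intro distinct0 d0 distinct d hpos h
    have hp : 0 < p := hpos p (List.mem_cons_self ..)
    simp only [richLoopA] at h
    by_cases hdvd : PySem.Int.mod d0 p = 0
    · rw [if_pos hdvd] at h
      by_cases hsq : PySem.Int.mod (PySem.Int.floordiv d0 p) p = 0
      · rw [if_pos hsq] at h; exact absurd h (by simp)
      · rw [if_neg hsq] at h
        obtain ⟨S, hS, hprod, hlen⟩ := ih (distinct0 + 1) (PySem.Int.floordiv d0 p) distinct d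
          (fun q hq => hpos q (List.mem_cons_of_mem _ hq)) h
        refine ⟨p :: S, List.Sublist.cons₂ _ hS, ?_, by simp [hlen]; omega⟩
        have hdvd' : p ∣ d0 := (PySem.Int.mod_eq_zero_iff_dvd d0 p).1 hdvd
        rw [PySem.Int.floordiv_eq_ediv_of_pos hp] at hprod
        have : d0 = p * (d0 / p) := (Int.mul_ediv_cancel' hdvd').symm
        rw [this, hprod, List.prod_cons]; ring
    · rw [if_neg hdvd] at h
      obtain ⟨S, hS, hprod, hlen⟩ := ih distinct0 d0 distinct d
        (fun q hq => hpos q (List.mem_cons_of_mem _ hq)) h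
      exact ⟨S, hS.cons _, hprod, hlen⟩

lemma rich_of_mem {n : Int} (h : n ∈ PRODUCTS) : is_sqfree_richA n 3 = true := by
  simp only [PRODUCTS, List.mem_cons, List.not_mem_nil, or_false] at h
  rcases h with h|h|h|h|h|h|h|h|h|h|h|h|h|h|h|h <;> subst h <;> decide

lemma mem_of_rich {n : Int} (h : is_sqfree_richA n 3 = true) : n ∈ PRODUCTS := by
  unfold is_sqfree_richA at h
  rcases hr : richLoopA [2, 3, 5, 7, 11] 0 n with _ | ⟨distinct, d⟩
  · rw [hr] at h; exact absurd h (by simp)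
  · rw [hr] at h
    simp only [Bool.and_eq_true, decide_eq_true_eq] at h
    obtain ⟨hd, hdist⟩ := h
    obtain ⟨S, hS, hprod, hlen⟩ := richLoopA_spec _ _ _ _ _ (by decide) hr
    subst hd
    have hmem : S ∈ ([2, 3, 5, 7, 11] : List Int).sublists := List.mem_sublists.2 hS
    fin_cases hmem <;> simp_all [PRODUCTS]

lemma find?_self {n : Int} (h : n ∈ PRODUCTS) :
    PRODUCTS.find? (fun s => n ≤ s) = some n := by
  simp only [PRODUCTS, List.mem_cons, List.not_mem_nil, or_false] at h
  rcases h with h|h|h|h|h|h|h|h|h|h|h|h|h|h|h|h <;> subst h <;> decide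

lemma find?_shift {n : Int} (l : List Int) (h : n ∉ l) :
    l.find? (fun s => n ≤ s) = l.find? (fun s => n + 1 ≤ s) := by
  induction l with
  | nil => rfl
  | cons a l ih =>
    have ha : a ≠ n := fun e => h (e ▸ List.mem_cons_self ..)
    have e : decide (n ≤ a) = decide (n + 1 ≤ a) :=
      decide_eq_decide.2 ⟨fun h1 => by omega, fun h1 => by omega⟩
    simp only [List.find?_cons, e]
    cases hd : decide (n + 1 ≤ a)
    · exact ih (fun m => h (List.mem_cons_of_mem _ m))
    · rfl

lemma padLoopA_eq (h n : Int) :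
    padLoopA h n =
      match PRODUCTS.find? (fun s => n ≤ s) with
      | some s => if s < h * 2 then s else h
      | none => h := by
  by_cases hlt : n < h * 2
  · rw [padLoopA, dif_pos hlt]
    cases hrich : is_sqfree_richA n 3 with
    | true =>
      rw [find?_self (mem_of_rich hrich)]
      simp [hlt]
    | false =>
      have hnot : n ∉ PRODUCTS := fun hm => by simp [rich_of_mem hm] at hrich
      rw [find?_shift _ hnot]
      simp only [Bool.false_eq_true, if_false]
      exact padLoopA_eq h (n + 1)
  · rw [padLoopA, dif_neg hlt]
    rcases hf : PRODUCTS.find? (fun s => n ≤ s) with _ | s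
    · rfl
    · have hs : n ≤ s := by simpa using List.find?_some hf
      have hns : ¬ s < h * 2 := by omega
      simp [hns]
termination_by (h * 2 - n).toNat
decreasing_by omega

-- ===== VERDICT (by name: the statement is the Claim_ definition above) =====
theorem sqfree_pad_dim_spec : Claim_equal_sqfree_pad_dim := by
  intro head_dim _dom
  unfold Spec_sqfree_pad_dim sqfree_pad_dim sqfree_pad_dim_alt
  by_cases h64 : head_dim = 64
  · subst h64; decide
  by_cases h96 : head_dim = 96
  · subst h96; decide
  by_cases h128 : head_dim = 128
  · subst h128; decide
  by_cases h256 : head_dim = 256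
  · subst h256; decide
  have hc : SQFREE_PAD.contains head_dim = false := by
    simp [SQFREE_PAD, PySem.Dict.contains_insert, PySem.Dict.contains_empty, h64, h96, h128, h256]
  have hg : SQFREE_PAD_B.get? head_dim = none := by
    simp [SQFREE_PAD_B, PySem.Dict.get?_insert, PySem.Dict.get?_empty, h64, h96, h128, h256]
  rw [hc, hg]
  simp only [Bool.false_eq_true, if_false]
  exact padLoopA_eq head_dim head_dim
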